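-- pv_equiv track=rewrite | github.com/netra-systems/zen | netra_backend/tests/integration/critical_paths/test_api_cors_policy_enforcement_l3.py | extract_cors_headers
-- ===== SOURCE A (Python) =====
-- from typing import Dict, List, Optional, Any, Union
--
-- def extract_cors_headers(response_headers: Dict[str, str]) -> Dict[str, str]:
--     """Extract CORS-related headers from response."""
--     cors_headers = {}
--
--     cors_header_names = [
--         "Access-Control-Allow-Origin",
--         "Access-Control-Allow-Methods",
--         "Access-Control-Allow-Headers",
--         "Access-Control-Expose-Headers",
--         "Access-Control-Allow-Credentials",
--         "Access-Control-Max-Age",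
--         "Vary"
--     ]
--
--     for header_name in cors_header_names:
--         if header_name in response_headers:
--             cors_headers[header_name] = response_headers[header_name]
--
--     return cors_headers
-- ===== SOURCE B (Python) =====
-- from typing import Dict
--
-- CORS_HEADER_PRIORITY = {name: i for i, name in enumerate([
--     "Access-Control-Allow-Origin",
--     "Access-Control-Allow-Methods",
--     "Access-Control-Allow-Headers",
--     "Access-Control-Expose-Headers",
--     "Access-Control-Allow-Credentials",
--     "Access-Control-Max-Age",
--     "Vary",
-- ])}
--
-- def extract_cors_headers(response_headers: Dict[str, str]) -> Dict[str, str]: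
--     """Extract CORS-related headers from response."""
--     hits = [(CORS_HEADER_PRIORITY[k], k, v)
--             for k, v in response_headers.items()
--             if k in CORS_HEADER_PRIORITY]
--     hits.sort(key=lambda t: t[0])
--     return {k: v for _, k, v in hits}
-- ===== Notes on version B (the rewrite author's own statement) =====
-- stated objective: alternative
-- what changed: Collect-and-sort instead of probe-in-fixed-order: one pass over response_headers tags each CORS header with its priority index from a precomputed name-to-index dict, then a stable sort on that index reconstructs A's canonical output order, replacing A's seven membership probes of the full dict.
import Mathlib
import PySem

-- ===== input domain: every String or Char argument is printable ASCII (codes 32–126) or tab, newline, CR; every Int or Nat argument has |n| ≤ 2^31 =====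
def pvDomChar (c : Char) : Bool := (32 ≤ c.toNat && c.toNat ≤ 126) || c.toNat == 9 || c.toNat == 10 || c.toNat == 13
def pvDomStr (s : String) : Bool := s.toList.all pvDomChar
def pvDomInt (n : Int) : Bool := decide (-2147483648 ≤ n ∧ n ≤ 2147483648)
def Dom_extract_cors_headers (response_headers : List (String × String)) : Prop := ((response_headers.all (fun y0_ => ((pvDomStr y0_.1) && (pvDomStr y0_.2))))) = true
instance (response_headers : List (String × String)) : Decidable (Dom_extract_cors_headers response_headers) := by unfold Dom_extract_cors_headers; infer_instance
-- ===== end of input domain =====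

-- B collects CORS entries in one pass tagged with a priority index, then sorts on that index
-- to recover A's canonical order (objective: alternative; return value only).

-- The seven-name list both sources spell out (A as a local list, B inside its priority dict).
def CORS_HEADER_NAMES : List String :=
  ["Access-Control-Allow-Origin",
   "Access-Control-Allow-Methods",
   "Access-Control-Allow-Headers",
   "Access-Control-Expose-Headers",
   "Access-Control-Allow-Credentials",
   "Access-Control-Max-Age",
   "Vary"]

-- ===== PORT A =====
-- 'header_name in response_headers' + 'response_headers[header_name]' = first-match lookup (find?);
-- inserting a fresh name into cors_headers appends.
def extract_cors_headers (response_headers : List (String × String)) : List (String × String) :=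
  CORS_HEADER_NAMES.foldl (fun cors_headers header_name =>
    match response_headers.find? (fun kv => kv.1 == header_name) with
    | some kv => cors_headers ++ [(header_name, kv.2)]
    | none => cors_headers) []

-- ===== PORT B =====
-- CORS_HEADER_PRIORITY = {name: i for i, name in enumerate([...])}
def CORS_HEADER_PRIORITY : PySem.Dict String Int :=
  (PySem.List.enumerate CORS_HEADER_NAMES 0).foldl
    (fun d p => d.insert p.2 p.1) PySem.Dict.empty

-- hits = [(PRIORITY[k], k, v) for k, v in response_headers.items() if k in PRIORITY]
def corsHits (response_headers : List (String × String)) : List (Int × String × String) :=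
  response_headers.filterMap (fun kv =>
    (CORS_HEADER_PRIORITY.get? kv.1).map (fun i => (i, kv.1, kv.2)))

-- hits.sort(key=lambda t: t[0]); return {k: v for _, k, v in hits}
def extract_cors_headers_alt (response_headers : List (String × String)) : List (String × String) :=
  (PySem.List.sorted (corsHits response_headers) (fun t => t.1) false).map
    (fun t => (t.2.1, t.2.2))

-- ===== PRECONDITION & SPEC =====
-- Pre_ excludes association lists with duplicate keys, which do not represent any Python dict
-- (the Python parameter is a dict, so its keys are necessarily distinct).
def Pre_extract_cors_headers (response_headers : List (String × String)) : Prop :=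
  (response_headers.map Prod.fst).Nodup
instance (response_headers : List (String × String)) : Decidable (Pre_extract_cors_headers response_headers) := by unfold Pre_extract_cors_headers; infer_instance

def pvWitness_extract_cors_headers : (List (String × String)) :=
  [("Vary", "Origin"), ("Content-Type", "application/json")]

def Spec_extract_cors_headers (response_headers : List (String × String)) (out : List (String × String)) : Prop := out = extract_cors_headers_alt response_headers
instance (response_headers : List (String × String)) (out : List (String × String)) : Decidable (Spec_extract_cors_headers response_headers out) := by unfold Spec_extract_cors_headers; infer_instance

-- ===== CLAIM (what is proved, stated in full; the proofs are below) =====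
def Claim_equal_extract_cors_headers : Prop := ∀ (response_headers : List (String × String)), Dom_extract_cors_headers response_headers → Pre_extract_cors_headers response_headers → Spec_extract_cors_headers response_headers (extract_cors_headers response_headers)

-- ===== LEMMAS AND PROOFS =====

-- A's output, with each pair tagged by its position in the name list: the common yardstick.
def corsTagged (h : List (String × String)) : List (Int × String × String) :=
  (PySem.List.enumerate CORS_HEADER_NAMES 0).filterMap (fun p =>
    (h.find? (fun kv => kv.1 == p.2)).map (fun kv => (p.1, p.2, kv.2)))

-- The priority dict, evaluated to a literal.
theorem priority_lit : CORS_HEADER_PRIORITY = PySem.Dict.mk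
    [("Access-Control-Allow-Origin", 0),
     ("Access-Control-Allow-Methods", 1),
     ("Access-Control-Allow-Headers", 2),
     ("Access-Control-Expose-Headers", 3),
     ("Access-Control-Allow-Credentials", 4),
     ("Access-Control-Max-Age", 5),
     ("Vary", 6)] := by decide

theorem priority_get?_iff (n : String) (i : Int) :
    CORS_HEADER_PRIORITY.get? n = some i ↔
      (i, n) ∈ PySem.List.enumerate CORS_HEADER_NAMES 0 := by
  rw [priority_lit]
  simp only [PySem.Dict.get?_mk_cons, CORS_HEADER_NAMES, PySem.List.enumerate_cons,
        PySem.List.enumerate_nil, List.mem_cons, List.not_mem_nil, or_false,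
        Prod.mk.injEq, beq_iff_eq]
  norm_num
  split_ifs <;>
    simp only [PySem.Dict.get?, List.find?, Option.some.injEq] <;>
    constructor <;> intro hh <;> (subst_vars; tauto)

-- With distinct keys, find? characterises membership.
theorem find?_eq_some_iff (h : List (String × String)) (n : String)
    (kv : String × String) (hnd : (h.map Prod.fst).Nodup) :
    h.find? (fun kv => kv.1 == n) = some kv ↔ kv ∈ h ∧ kv.1 = n := by
  induction h with
  | nil => simp
  | cons x t ih =>
    rw [List.map_cons, List.nodup_cons] at hnd
    rw [List.find?_cons]
    by_cases hx : x.1 = n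
    · have : (x.1 == n) = true := by simp [hx]
      rw [this]
      constructor
      · rintro ⟨rfl⟩; exact ⟨List.mem_cons_self, hx⟩
      · rintro ⟨hmem, hk⟩
        rcases List.mem_cons.mp hmem with rfl | hmem
        · rfl
        · have hm : kv.1 ∈ t.map Prod.fst := List.mem_map_of_mem hmem
          rw [hk, ← hx] at hm
          exact absurd hm (by simpa using hnd.1)
    · have : (x.1 == n) = false := by simp [hx]
      rw [this, ih hnd.2]
      constructor
      · rintro ⟨hmem, hk⟩; exact ⟨List.mem_cons_of_mem _ hmem, hk⟩
      · rintro ⟨hmem, hk⟩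
        rcases List.mem_cons.mp hmem with rfl | hmem
        · exact absurd hk hx
        · exact ⟨hmem, hk⟩

theorem tagged_pairwise (h : List (String × String)) :
    (corsTagged h).Pairwise (fun a b => a.1 < b.1) := by
  unfold corsTagged
  refine List.Pairwise.filterMap _ ?_ (PySem.List.pairwise_lt_enumerate _ _)
  intro p q hpq a ha b hb
  rcases Option.map_eq_some_iff.mp ha with ⟨_, _, rfl⟩
  rcases Option.map_eq_some_iff.mp hb with ⟨_, _, rfl⟩
  exact hpq

-- Keys of the hit list = keys of the matching entries, in h's order.
theorem hits_keys (h : List (String × String)) :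
    (corsHits h).map (fun t => t.2.1) =
      (h.filter (fun kv => (CORS_HEADER_PRIORITY.get? kv.1).isSome)).map Prod.fst := by
  induction h with
  | nil => rfl
  | cons kv t ih =>
    unfold corsHits at *
    rw [List.filterMap_cons, List.filter_cons]
    cases hg : CORS_HEADER_PRIORITY.get? kv.1 <;> simp [ih]

theorem hits_nodup (h : List (String × String)) (hnd : (h.map Prod.fst).Nodup) :
    (corsHits h).Nodup := by
  refine List.Nodup.of_map (fun t => t.2.1) ?_
  rw [hits_keys]
  exact (List.filter_sublist.map Prod.fst).nodup hnd

theorem mem_hits_iff_mem_tagged (h : List (String × String))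
    (hnd : (h.map Prod.fst).Nodup) (a : Int × String × String) :
    a ∈ corsHits h ↔ a ∈ corsTagged h := by
  obtain ⟨i, n, v⟩ := a
  unfold corsHits corsTagged
  simp only [List.mem_filterMap, Option.map_eq_some_iff, Prod.mk.injEq]
  constructor
  · rintro ⟨kv, hkv, j, hj, rfl, rfl, rfl⟩
    refine ⟨(j, kv.1), (priority_get?_iff _ _).mp hj, kv, ?_, rfl, rfl, rfl⟩
    exact (find?_eq_some_iff h kv.1 kv hnd).mpr ⟨hkv, rfl⟩
  · rintro ⟨p, hp, kv, hfind, rfl, rfl, rfl⟩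
    obtain ⟨hkv, hk⟩ := (find?_eq_some_iff h p.2 kv hnd).mp hfind
    exact ⟨kv, hkv, p.1, by rw [hk]; exact (priority_get?_iff _ _).mpr (by simpa using hp),
           rfl, hk, rfl⟩

theorem tagged_nodup (h : List (String × String)) : (corsTagged h).Nodup :=
  (tagged_pairwise h).imp (fun hab => by rintro rfl; exact lt_irrefl _ hab)

theorem sorted_hits_eq_tagged (h : List (String × String))
    (hnd : (h.map Prod.fst).Nodup) :
    PySem.List.sorted (corsHits h) (fun t => t.1) false = corsTagged h := by
  refine PySem.List.sorted_eq_of_perm_of_pairwise_lt _ _ _ ?_ (tagged_pairwise h)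
  exact (List.perm_ext_iff_of_nodup (tagged_nodup h) (hits_nodup h hnd)).mpr
    (fun a => (mem_hits_iff_mem_tagged h hnd a).symm)

-- A's fold over the name list, generalized over the enumeration start and accumulator.
theorem foldA_eq_tagged (h : List (String × String)) :
    ∀ (ns : List String) (s : Int) (acc : List (String × String)),
      ns.foldl (fun cors n =>
        match h.find? (fun kv => kv.1 == n) with
        | some kv => cors ++ [(n, kv.2)]
        | none => cors) acc =
      acc ++ ((PySem.List.enumerate ns s).filterMap (fun p =>
        (h.find? (fun kv => kv.1 == p.2)).map (fun kv => (p.1, p.2, kv.2)))).map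
          (fun t => (t.2.1, t.2.2)) := by
  intro ns
  induction ns with
  | nil => simp [PySem.List.enumerate_nil]
  | cons n t ih =>
    intro s acc
    rw [List.foldl_cons, PySem.List.enumerate_cons, List.filterMap_cons]
    cases hf : h.find? (fun kv => kv.1 == n) <;>
      simp [ih (s + 1), List.append_assoc]

-- ===== VERDICT (by name: the statement is the Claim_ definition above) =====
theorem extract_cors_headers_spec : Claim_equal_extract_cors_headers := by
  intro h _ hpre
  unfold Spec_extract_cors_headers extract_cors_headers extract_cors_headers_alt
  rw [sorted_hits_eq_tagged h hpre, foldA_eq_tagged h CORS_HEADER_NAMES 0 []]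
  rfl
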